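-- pv_equiv track=rewrite | github.com/guilhermeRRS/pas | pacotePadrao.py | dontrepete_doubled
-- ===== SOURCE A (Python) =====
-- def dontrepete_doubled(arquivo):
-- 	certo = 1
-- 	erro = []
--
-- 	dados = []
-- 	linhas = []
-- 	linhasRepetidas = []
-- 	repetidos = []
--
-- 	for i in range(0, len(arquivo)):
-- 		if(not arquivo[i][1][1]):
-- 			dados.append([arquivo[i][1][0],arquivo[i][1][1]])
-- 		else:
-- 			dados.append([arquivo[i][1][0],arquivo[i][1][1] - 1])
--
-- 		linhas.append(i)
--
-- 	for i in range(0, len(dados)):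
-- 		if(dados.count(dados[i]) > 1):
-- 			if(repetidos.count(dados[i]) == 0):
-- 				repetidos.append(dados[i])
-- 				linhasRepetidas.append([linhas[i]])
-- 			else:
-- 				linhasRepetidas[repetidos.index(dados[i])].append(linhas[i])
--
-- 	if(len(linhasRepetidas) > 0):
-- 		certo = 0
-- 		for i in range(0, len(linhasRepetidas)):
-- 			if(arquivo[linhasRepetidas[i][0]][1][1] == 2):
-- 				textoNivel = "com um @"
-- 			else:
-- 				textoNivel = "com um ! ou nada"
-- 			mensagem = "Erro, o mesmo dado ["+str(arquivo[linhasRepetidas[i][0]][1][0])+"] foi mencionado mais de uma vez ["+textoNivel+"], mantes em somente uma das seguintes linhas [isso não é um erro, é a indicação de uma redundância no arquivo]: "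
-- 			for j in range(0, len(linhasRepetidas[i])):
-- 				if(j != 0):
-- 					if(j < len(linhasRepetidas[i]) - 1):
-- 						mensagem = mensagem+", "
-- 					else:
-- 						mensagem = mensagem+" e "
-- 				mensagem = mensagem+str(arquivo[linhasRepetidas[i][j]][0] + 1)
-- 			erro.append(mensagem)
--
-- 	return certo, erro, arquivo
-- ===== SOURCE B (Python) =====
-- def dontrepete_doubled(arquivo):
-- 	# Sort-and-sweep: sort the (key, line) pairs so equal entries become adjacent,
-- 	# sweep runs of equal keys, keep runs longer than one, then restore
-- 	# first-occurrence order by sorting the surviving groups by first line.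
-- 	pairs = [((nome, nivel - 1 if nivel else nivel), i)
-- 		for i, (num, (nome, nivel)) in enumerate(arquivo)]
-- 	pairs = sorted(pairs, key=lambda p: p[0])
-- 	runs = []
-- 	lo = 0
-- 	while lo < len(pairs):
-- 		hi = lo + 1
-- 		while hi < len(pairs) and pairs[hi][0] == pairs[lo][0]:
-- 			hi += 1
-- 		runs.append([p[1] for p in pairs[lo:hi]])
-- 		lo = hi
-- 	dups = [g for g in runs if len(g) > 1]
-- 	dups = sorted(dups, key=lambda g: g[0])
-- 	if not dups:
-- 		return 1, [], arquivo
-- 	erro = []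
-- 	for idxs in dups:
-- 		if arquivo[idxs[0]][1][1] == 2:
-- 			textoNivel = "com um @"
-- 		else:
-- 			textoNivel = "com um ! ou nada"
-- 		nums = [str(arquivo[j][0] + 1) for j in idxs]
-- 		mensagem = ("Erro, o mesmo dado ["+str(arquivo[idxs[0]][1][0])+"] foi mencionado mais de uma vez ["
-- 			+textoNivel+"], mantes em somente uma das seguintes linhas [isso não é um erro, é a indicação de uma redundância no arquivo]: "
-- 			+", ".join(nums[:-1])+" e "+nums[-1])
-- 		erro.append(mensagem)
-- 	return 0, erro, arquivo
-- ===== Notes on version B (the rewrite author's own statement) =====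
-- stated objective: faster
-- what changed: B replaces A's quadratic per-index count/index scans by sort-and-sweep: it sorts the (normalized key, line) pairs so equal entries become adjacent, sweeps runs of equal keys, keeps runs longer than one, and re-sorts the surviving groups by first line to restore A's first-occurrence report order, formatting the line list with a join instead of A's per-position separator loop.
import Mathlib
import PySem

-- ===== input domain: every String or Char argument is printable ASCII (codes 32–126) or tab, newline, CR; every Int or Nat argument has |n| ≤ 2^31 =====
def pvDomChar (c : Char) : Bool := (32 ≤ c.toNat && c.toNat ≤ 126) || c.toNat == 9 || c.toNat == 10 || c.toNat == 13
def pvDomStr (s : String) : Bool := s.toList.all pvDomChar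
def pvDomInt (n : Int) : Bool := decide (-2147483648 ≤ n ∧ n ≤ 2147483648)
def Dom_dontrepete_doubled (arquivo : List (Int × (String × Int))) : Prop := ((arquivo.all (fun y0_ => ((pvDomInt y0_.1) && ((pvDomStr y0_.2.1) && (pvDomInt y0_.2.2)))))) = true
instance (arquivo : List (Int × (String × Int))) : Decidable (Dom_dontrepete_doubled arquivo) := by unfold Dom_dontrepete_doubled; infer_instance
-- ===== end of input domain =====

-- B replaces A's quadratic count/index scans by sort-and-sweep: sort the (key, line) pairs,
-- sweep runs of equal keys, keep runs longer than one, re-sort the groups by first line (objective: faster).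

-- ===== PORT A =====
def dontrepete_doubled (arquivo : List (Int × (String × Int))) : Int × List String × (List (Int × (String × Int))) :=
  let dflt : Int × (String × Int) := (0, ("", 0))
  let certo : Int := 1
  let st1 := (PySem.List.pyRange 0 (arquivo.length : Int) 1).foldl
    (fun (st : List (String × Int) × List Int) i =>
      let e := PySem.List.pyGetD arquivo i dflt
      let d := if e.2.2 = 0 then (e.2.1, e.2.2) else (e.2.1, e.2.2 - 1)
      (st.1 ++ [d], st.2 ++ [i])) ([], [])
  let dados := st1.1
  let linhas := st1.2
  let st2 := (PySem.List.pyRange 0 (dados.length : Int) 1).foldl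
    (fun (st : List (String × Int) × List (List Int)) i =>
      let di := PySem.List.pyGetD dados i ("", 0)
      if 1 < PySem.List.count dados di then
        if PySem.List.count st.1 di = 0 then
          (st.1 ++ [di], st.2 ++ [[PySem.List.pyGetD linhas i 0]])
        else
          (st.1, st.2.modify ((PySem.List.index? st.1 di).getD 0) (· ++ [PySem.List.pyGetD linhas i 0]))
      else st) ([], [])
  let linhasRepetidas := st2.2
  if 0 < linhasRepetidas.length then
    let erro := (PySem.List.pyRange 0 (linhasRepetidas.length : Int) 1).foldl
      (fun (er : List String) i =>
        let grp := PySem.List.pyGetD linhasRepetidas i []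
        let e0 := PySem.List.pyGetD arquivo (PySem.List.pyGetD grp 0 0) dflt
        let textoNivel := if e0.2.2 = 2 then "com um @" else "com um ! ou nada"
        let mensagem := "Erro, o mesmo dado [" ++ e0.2.1 ++ "] foi mencionado mais de uma vez [" ++ textoNivel ++ "], mantes em somente uma das seguintes linhas [isso não é um erro, é a indicação de uma redundância no arquivo]: "
        let mensagem := (PySem.List.pyRange 0 (grp.length : Int) 1).foldl
          (fun (m : String) j =>
            let m := if j ≠ 0 then (if j < (grp.length : Int) - 1 then m ++ ", " else m ++ " e ") else m
            m ++ PySem.Int.toStr ((PySem.List.pyGetD arquivo (PySem.List.pyGetD grp j 0) dflt).1 + 1)) mensagem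
        er ++ [mensagem]) []
    (0, erro, arquivo)
  else (certo, [], arquivo)

-- ===== PORT B =====
-- B-side helper: the run-sweep while loop of Source B — `lo` walks the sorted pair list,
-- the inner while (scan for `hi`) is the takeWhile on the tail, each run appends its line list.
def pvRunAux (pairs : List ((String × Int) × Int)) (lo : Nat) (acc : List (List Int)) :
    List (List Int) :=
  if h : lo < pairs.length then
    let p := pairs[lo]
    let tw := (pairs.drop (lo + 1)).takeWhile (fun q => q.1 == p.1)
    pvRunAux pairs (lo + 1 + tw.length) (acc ++ [(p :: tw).map (fun q => q.2)])
  else acc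
termination_by pairs.length - lo
decreasing_by omega

def dontrepete_doubled_alt (arquivo : List (Int × (String × Int))) : Int × List String × (List (Int × (String × Int))) :=
  let dflt : Int × (String × Int) := (0, ("", 0))
  let pairs := (PySem.List.enumerate arquivo).map
    (fun p => ((p.2.2.1, if p.2.2.2 ≠ 0 then p.2.2.2 - 1 else p.2.2.2), p.1))
  let pairs := PySem.List.sorted2 pairs (fun p => p.1.1) (fun p => p.1.2) false
  let dups := (pvRunAux pairs 0 []).filter (fun g => decide (1 < g.length))
  let dups := PySem.List.sorted dups (fun g => PySem.List.pyGetD g 0 0) false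
  if dups.isEmpty then (1, [], arquivo)
  else
    let erro := dups.foldl
      (fun (er : List String) idxs =>
        let e0 := PySem.List.pyGetD arquivo (PySem.List.pyGetD idxs 0 0) dflt
        let textoNivel := if e0.2.2 = 2 then "com um @" else "com um ! ou nada"
        let nums := idxs.map (fun j => PySem.Int.toStr ((PySem.List.pyGetD arquivo j dflt).1 + 1))
        let mensagem := "Erro, o mesmo dado [" ++ e0.2.1 ++ "] foi mencionado mais de uma vez [" ++ textoNivel ++ "], mantes em somente uma das seguintes linhas [isso não é um erro, é a indicação de uma redundância no arquivo]: "
          ++ PySem.Str.join ", " (PySem.List.slice nums none (some (-1))) ++ " e " ++ PySem.List.pyGetD nums (-1) ""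
        er ++ [mensagem]) []
    (0, erro, arquivo)

-- ===== PRECONDITION & SPEC =====
def Spec_dontrepete_doubled (arquivo : List (Int × (String × Int))) (out : Int × List String × (List (Int × (String × Int)))) : Prop := out = dontrepete_doubled_alt arquivo
instance (arquivo : List (Int × (String × Int))) (out : Int × List String × (List (Int × (String × Int)))) : Decidable (Spec_dontrepete_doubled arquivo out) := by unfold Spec_dontrepete_doubled; infer_instance

-- ===== CLAIM (what is proved, stated in full; the proofs are below) =====
def Claim_equal_dontrepete_doubled : Prop := ∀ (arquivo : List (Int × (String × Int))), Dom_dontrepete_doubled arquivo → Spec_dontrepete_doubled arquivo (dontrepete_doubled arquivo)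

-- ===== LEMMAS AND PROOFS =====

-- the normalized key A stores in `dados` (= the key B sorts by)
def pvNorm (e : Int × (String × Int)) : String × Int :=
  if e.2.2 = 0 then (e.2.1, e.2.2) else (e.2.1, e.2.2 - 1)

-- append index i to the (unique) entry of key k, or open a new group at the end
-- (the state A's second loop maintains, as one association list)
def pvAdd (acc : List ((String × Int) × List Int)) (k : String × Int) (i : Int) :
    List ((String × Int) × List Int) :=
  match acc with
  | [] => [(k, [i])]
  | q :: t => if q.1 == k then (q.1, q.2 ++ [i]) :: t else q :: pvAdd t k i

-- the group list for key k (first-match lookup)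
def pvLook (acc : List ((String × Int) × List Int)) (k : String × Int) : List Int :=
  ((acc.find? (fun r => r.1 == k)).map Prod.snd).getD []

-- the separator glue of A's message loop: ", " before middle items, " e " before the last
def pvGlue : List String → String
  | [] => ""
  | [x] => " e " ++ x
  | x :: y :: t => ", " ++ x ++ pvGlue (y :: t)

-- the run sweep as a structural recursion on the suffix (what pvRunAux computes)
def pvRunG : List ((String × Int) × Int) → List (List Int)
  | [] => []
  | p :: t =>
      (p.2 :: (t.takeWhile (fun q => q.1 == p.1)).map (fun q => q.2)) ::
      pvRunG (t.dropWhile (fun q => q.1 == p.1))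
termination_by l => l.length
decreasing_by
  simpa using Nat.lt_succ_of_le (List.length_dropWhile_le _ _)

-- Python's '<' on the (name, level) key tuples: lexicographic
def pvKeyLt (k k' : String × Int) : Prop := k.1 < k'.1 ∨ (k.1 = k'.1 ∧ k.2 < k'.2)

-- strict order refining the sort: key lexicographically, ties by line index
def pvLT3 (a b : (String × Int) × Int) : Prop := pvKeyLt a.1 b.1 ∨ (a.1 = b.1 ∧ a.2 < b.2)

-- the keys of the runs, in run order (same recursion as pvRunG)
def pvKeysG : List ((String × Int) × Int) → List (String × Int)
  | [] => []
  | p :: t => p.1 :: pvKeysG (t.dropWhile (fun q => q.1 == p.1))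
termination_by l => l.length
decreasing_by
  simpa using Nat.lt_succ_of_le (List.length_dropWhile_le _ _)

theorem pvNorm_eq (e : Int × (String × Int)) :
    pvNorm e = (e.2.1, if e.2.2 ≠ 0 then e.2.2 - 1 else e.2.2) := by
  unfold pvNorm; by_cases h : e.2.2 = 0 <;> simp [h]

theorem pvDropWhile_drop {α : Type} (q : α → Bool) (l : List α) :
    l.dropWhile q = l.drop (l.takeWhile q).length := by
  induction l with
  | nil => rfl
  | cons a t ih =>
    by_cases h : q a = true
    · rw [List.dropWhile_cons, if_pos h, List.takeWhile_cons, if_pos h]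
      simpa using ih
    · rw [List.dropWhile_cons, if_neg h, List.takeWhile_cons, if_neg h]
      rfl

theorem pvRunAux_eq (pairs : List ((String × Int) × Int)) :
    ∀ (lo : Nat) (acc : List (List Int)),
    pvRunAux pairs lo acc = acc ++ pvRunG (pairs.drop lo) := by
  have H : ∀ (n lo : Nat), pairs.length - lo ≤ n → ∀ acc,
      pvRunAux pairs lo acc = acc ++ pvRunG (pairs.drop lo) := by
    intro n
    induction n with
    | zero =>
      intro lo hle acc
      have hge : pairs.length ≤ lo := by omega
      rw [pvRunAux, dif_neg (by omega), List.drop_eq_nil_of_le hge, pvRunG]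
      simp
    | succ n ihn =>
      intro lo hle acc
      by_cases h : lo < pairs.length
      · rw [pvRunAux, dif_pos h]
        have hdrop : pairs.drop lo = pairs[lo] :: pairs.drop (lo + 1) :=
          List.drop_eq_getElem_cons h
        rw [hdrop, pvRunG]
        have hdw : (pairs.drop (lo + 1)).dropWhile (fun q => q.1 == pairs[lo].1)
            = pairs.drop (lo + 1 +
                ((pairs.drop (lo + 1)).takeWhile (fun q => q.1 == pairs[lo].1)).length) := by
          rw [pvDropWhile_drop, List.drop_drop]
        rw [ihn _ (by omega), hdw]
        simp
      · rw [pvRunAux, dif_neg h]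
        rw [List.drop_eq_nil_of_le (by omega), pvRunG]
        simp
  intro lo acc
  exact H (pairs.length - lo) lo (le_refl _) acc

theorem map_fst_pvAdd (acc : List ((String × Int) × List Int)) (k : String × Int) (i : Int) :
    (pvAdd acc k i).map Prod.fst =
      if k ∈ acc.map Prod.fst then acc.map Prod.fst else acc.map Prod.fst ++ [k] := by
  induction acc with
  | nil => simp [pvAdd]
  | cons q t ih =>
    by_cases h : q.1 = k
    · have hb : (q.1 == k) = true := by simp [h]
      simp [pvAdd, h]
    · have hb : (q.1 == k) = false := by simp [h]
      by_cases hm : k ∈ t.map Prod.fst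
      · simp [pvAdd, hb, ih, hm, Ne.symm h]
      · simp [pvAdd, hb, ih, hm, Ne.symm h]

theorem nodup_pvAdd (acc : List ((String × Int) × List Int)) (k : String × Int) (i : Int)
    (h : (acc.map Prod.fst).Nodup) : ((pvAdd acc k i).map Prod.fst).Nodup := by
  rw [map_fst_pvAdd]
  split_ifs with hm
  · exact h
  · rw [List.nodup_append]
    refine ⟨h, List.nodup_singleton _, ?_⟩
    intro a ha b hbm
    exact fun e => hm (List.mem_singleton.1 hbm ▸ e ▸ ha)

theorem pvAdd_of_not_mem (acc : List ((String × Int) × List Int)) (k : String × Int) (i : Int)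
    (h : k ∉ acc.map Prod.fst) : pvAdd acc k i = acc ++ [(k, [i])] := by
  induction acc with
  | nil => simp [pvAdd]
  | cons q t ih =>
    have hq : (q.1 == k) = false := by
      simp only [beq_eq_false_iff_ne, ne_eq]
      rintro rfl; exact h (by simp)
    have ht : k ∉ t.map Prod.fst := fun m => h (by simp [m])
    simp [pvAdd, hq, ih ht]

theorem filter_pvAdd_neg (pk : (String × Int) → Bool) (acc : List ((String × Int) × List Int))
    (k : String × Int) (i : Int) (hpk : pk k = false) :
    (pvAdd acc k i).filter (fun q => pk q.1) = acc.filter (fun q => pk q.1) := by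
  induction acc with
  | nil => simp [pvAdd, hpk]
  | cons q t ih =>
    by_cases h : q.1 = k
    · simp [pvAdd, h, hpk]
    · have hb : (q.1 == k) = false := by simp [h]
      simp [pvAdd, hb, List.filter_cons, ih]

theorem filter_pvAdd_pos (pk : (String × Int) → Bool) (acc : List ((String × Int) × List Int))
    (k : String × Int) (i : Int) (hnd : (acc.map Prod.fst).Nodup)
    (hmem : k ∈ acc.map Prod.fst) (hpk : pk k = true) :
    ((pvAdd acc k i).filter (fun q => pk q.1)).map Prod.fst
        = (acc.filter (fun q => pk q.1)).map Prod.fst ∧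
    ((pvAdd acc k i).filter (fun q => pk q.1)).map Prod.snd
        = ((acc.filter (fun q => pk q.1)).map Prod.snd).modify
            (List.idxOf k ((acc.filter (fun q => pk q.1)).map Prod.fst)) (· ++ [i]) := by
  induction acc with
  | nil => simp at hmem
  | cons q t ih =>
    by_cases h : q.1 = k
    · have hb : (q.1 == k) = true := by simp [h]
      have hkt : k ∉ t.map Prod.fst := by
        rw [List.map_cons, List.nodup_cons] at hnd; rw [← h]; exact hnd.1
      have hft : k ∉ (t.filter (fun q => pk q.1)).map Prod.fst := by
        intro hc
        rcases List.mem_map.1 hc with ⟨q2, hq2, hq2e⟩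
        exact hkt (List.mem_map.2 ⟨q2, (List.mem_filter.1 hq2).1, hq2e⟩)
      subst h
      simp [pvAdd, hpk, List.idxOf_cons_self, List.modify]
    · have hb : (q.1 == k) = false := by simp [h]
      have hnd' : (t.map Prod.fst).Nodup := by
        rw [List.map_cons, List.nodup_cons] at hnd; exact hnd.2
      have hmt : k ∈ t.map Prod.fst := by
        rcases (by simpa using hmem) with hc | hc
        · exact absurd hc.symm h
        · simpa using hc
      obtain ⟨ih1, ih2⟩ := ih hnd' hmt
      by_cases hq : pk q.1 = true
      · have hne : q.1 ≠ k := h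
        simp only [pvAdd, hb, if_false, Bool.false_eq_true, List.filter_cons, hq, if_true,
          List.map_cons, ih1, ih2]
        constructor
        · trivial
        · rw [List.idxOf_cons, show (q.1 == k) = false from hb]
          simp [List.modify]
      · simp only [pvAdd, hb, Bool.false_eq_true, if_false, List.filter_cons, hq]
        exact ⟨ih1, ih2⟩

theorem pvIdx (l : List (String × Int)) (k : String × Int) (h : k ∈ l) :
    (List.idxOf? k l).getD 0 = List.idxOf k l := by
  induction l with
  | nil => cases h
  | cons x t ih =>
    by_cases hx : x = k
    · simp [hx, List.idxOf?_cons]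
    · have hb : (x == k) = false := by simp [hx]
      have hm : k ∈ t := by
        rcases List.mem_cons.1 h with rfl | hm
        · exact absurd rfl hx
        · exact hm
      simp only [List.idxOf?_cons, List.idxOf_cons, hb, cond_false, Bool.false_eq_true, if_false]
      cases hq : List.idxOf? k t with
      | none => exact absurd (List.idxOf?_eq_none_iff.1 hq) (by simp [hm])
      | some v => simpa [hq] using ih hm

theorem pv_main (pk : (String × Int) → Prop) [DecidablePred pk] :
    ∀ (ps : List (Int × (String × Int))) (acc : List ((String × Int) × List Int)),
    (acc.map Prod.fst).Nodup →
    ps.foldl (fun st p =>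
        if pk p.2 then
          (if PySem.List.count st.1 p.2 = 0 then (st.1 ++ [p.2], st.2 ++ [[p.1]])
           else (st.1, st.2.modify ((PySem.List.index? st.1 p.2).getD 0) (· ++ [p.1])))
        else st)
      ((acc.filter (fun q => decide (pk q.1))).map Prod.fst,
       (acc.filter (fun q => decide (pk q.1))).map Prod.snd)
    = (((ps.foldl (fun a p => pvAdd a p.2 p.1) acc).filter (fun q => decide (pk q.1))).map Prod.fst,
       ((ps.foldl (fun a p => pvAdd a p.2 p.1) acc).filter (fun q => decide (pk q.1))).map Prod.snd) := by
  intro ps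
  induction ps with
  | nil => intro acc _; simp
  | cons p t ih =>
    intro acc hnd
    simp only [List.foldl_cons]
    have hnd' := nodup_pvAdd acc p.2 p.1 hnd
    by_cases hpk : pk p.2
    · by_cases hin : p.2 ∈ (acc.filter (fun q => decide (pk q.1))).map Prod.fst
      · -- key already reported: A appends to the existing group
        have hcnt : ¬ PySem.List.count ((acc.filter (fun q => decide (pk q.1))).map Prod.fst) p.2 = 0 := by
          simp only [PySem.List.count, List.count_eq_zero]
          exact fun hc => hc hin
        have hidx : (PySem.List.index? ((acc.filter (fun q => decide (pk q.1))).map Prod.fst) p.2).getD 0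
            = List.idxOf p.2 ((acc.filter (fun q => decide (pk q.1))).map Prod.fst) := by
          simp only [PySem.List.index?]
          exact pvIdx _ _ hin
        have hmem : p.2 ∈ acc.map Prod.fst := by
          rcases List.mem_map.1 hin with ⟨q, hq, hq2⟩
          exact List.mem_map.2 ⟨q, (List.mem_filter.1 hq).1, hq2⟩
        obtain ⟨e1, e2⟩ := filter_pvAdd_pos (fun q => decide (pk q)) acc p.2 p.1 hnd hmem (by simp [hpk])
        rw [if_pos hpk, if_neg hcnt, hidx, ← e2, ← e1, ih _ hnd']
      · -- first duplicate occurrence: A opens a new group at the end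
        have hcnt : PySem.List.count ((acc.filter (fun q => decide (pk q.1))).map Prod.fst) p.2 = 0 := by
          simp only [PySem.List.count, List.count_eq_zero]; exact hin
        have hnmem : p.2 ∉ acc.map Prod.fst := by
          intro hc
          rcases List.mem_map.1 hc with ⟨q, hq, hq2⟩
          exact hin (List.mem_map.2 ⟨q, List.mem_filter.2 ⟨hq, by simp [hq2, hpk]⟩, hq2⟩)
        have e3 : pvAdd acc p.2 p.1 = acc ++ [(p.2, [p.1])] := pvAdd_of_not_mem _ _ _ hnmem
        have e1 : ((pvAdd acc p.2 p.1).filter (fun q => decide (pk q.1))).map Prod.fst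
            = (acc.filter (fun q => decide (pk q.1))).map Prod.fst ++ [p.2] := by
          rw [e3, List.filter_append, List.map_append]; simp [hpk]
        have e2 : ((pvAdd acc p.2 p.1).filter (fun q => decide (pk q.1))).map Prod.snd
            = (acc.filter (fun q => decide (pk q.1))).map Prod.snd ++ [[p.1]] := by
          rw [e3, List.filter_append, List.map_append]; simp [hpk]
        rw [if_pos hpk, if_pos hcnt, ← e1, ← e2, ih _ hnd']
    · -- not a duplicated key: A skips, the new/updated group is filtered out
      have e := filter_pvAdd_neg (fun q => decide (pk q)) acc p.2 p.1 (by simp [hpk])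
      rw [if_neg hpk, ← congrArg (List.map Prod.fst) e, ← congrArg (List.map Prod.snd) e, ih _ hnd']

theorem nodup_pvFold (ps : List (Int × (String × Int))) :
    ∀ (acc : List ((String × Int) × List Int)), (acc.map Prod.fst).Nodup →
    (((ps.foldl (fun a p => pvAdd a p.2 p.1) acc)).map Prod.fst).Nodup := by
  induction ps with
  | nil => intro acc h; simpa using h
  | cons p t ih => intro acc h; exact ih _ (nodup_pvAdd _ _ _ h)

theorem pvLook_pvAdd (acc : List ((String × Int) × List Int)) (k' : String × Int) (i : Int)
    (k : String × Int) :
    pvLook (pvAdd acc k' i) k = if k = k' then pvLook acc k ++ [i] else pvLook acc k := by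
  induction acc with
  | nil =>
    by_cases h : k = k'
    · simp [pvAdd, pvLook, h]
    · simp [pvAdd, pvLook, h, Ne.symm h]
  | cons q t ih =>
    by_cases h1 : q.1 = k'
    · have hb : (q.1 == k') = true := by simp [h1]
      by_cases h2 : q.1 = k
      · have : k = k' := h2 ▸ h1
        simp [pvAdd, pvLook, h2, this]
      · have hkk : ¬ k = k' := fun e => h2 (h1.trans e.symm)
        have hb2 : (q.1 == k) = false := by simp [h2]
        simp [pvAdd, pvLook, hb, hb2, hkk]
    · have hb : (q.1 == k') = false := by simp [h1]
      by_cases h2 : q.1 = k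
      · have hkk : ¬ k = k' := fun e => h1 (h2.trans e)
        have hb2 : (q.1 == k) = true := by simp [h2]
        simp [pvAdd, pvLook, hb, hb2, hkk]
      · have hb2 : (q.1 == k) = false := by simp [h2]
        have := ih
        simp only [pvAdd, hb, Bool.false_eq_true, if_false]
        simp only [pvLook, List.find?_cons, hb2] at *
        exact this

theorem pvLook_fold (ps : List (Int × (String × Int))) :
    ∀ (acc : List ((String × Int) × List Int)) (k : String × Int),
    pvLook (ps.foldl (fun a p => pvAdd a p.2 p.1) acc) k
      = pvLook acc k ++ (ps.filter (fun p => p.2 == k)).map Prod.fst := by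
  induction ps with
  | nil => intro acc k; simp
  | cons p t ih =>
    intro acc k
    simp only [List.foldl_cons, List.filter_cons]
    by_cases h : p.2 = k
    · have hb : (p.2 == k) = true := by simp [h]
      rw [ih, pvLook_pvAdd, if_pos h.symm]
      simp [hb]
    · have hb : (p.2 == k) = false := by simp [h]
      rw [ih, pvLook_pvAdd, if_neg (fun e => h e.symm)]
      simp [hb]

theorem pvLook_mem (acc : List ((String × Int) × List Int))
    (hnd : (acc.map Prod.fst).Nodup) (q : (String × Int) × List Int) (hq : q ∈ acc) :
    pvLook acc q.1 = q.2 := by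
  induction acc with
  | nil => cases hq
  | cons x t ih =>
    rw [List.map_cons, List.nodup_cons] at hnd
    rcases List.mem_cons.1 hq with rfl | hq
    · simp [pvLook]
    · have hne : (x.1 == q.1) = false := by
        simp only [beq_eq_false_iff_ne, ne_eq]
        intro e
        exact hnd.1 (e ▸ List.mem_map.2 ⟨q, hq, rfl⟩)
      simp only [pvLook, List.find?_cons, hne]
      exact ih hnd.2 hq

theorem pvMem_fst_fold (ps : List (Int × (String × Int))) :
    ∀ (acc : List ((String × Int) × List Int)) (k : String × Int),
    k ∈ (ps.foldl (fun a p => pvAdd a p.2 p.1) acc).map Prod.fst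
      ↔ k ∈ acc.map Prod.fst ∨ k ∈ ps.map Prod.snd := by
  induction ps with
  | nil => intro acc k; simp
  | cons p t ih =>
    intro acc k
    simp only [List.foldl_cons, List.map_cons, List.mem_cons]
    rw [ih]
    rw [map_fst_pvAdd]
    by_cases hm : p.2 ∈ acc.map Prod.fst
    · rw [if_pos hm]
      have he : k = p.2 → k ∈ acc.map Prod.fst := fun e => e ▸ hm
      tauto
    · rw [if_neg hm]
      simp only [List.mem_append, List.mem_singleton]
      tauto

-- ===== key-order helper lemmas (Python's lexicographic '<' on the key tuples) =====

theorem pvKeyLt_irrefl (k : String × Int) : ¬ pvKeyLt k k := by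
  unfold pvKeyLt; simp

theorem pvKeyLt_trans {a b c : String × Int} (h1 : pvKeyLt a b) (h2 : pvKeyLt b c) : pvKeyLt a c := by
  unfold pvKeyLt at *
  rcases h1 with h1 | ⟨e1, l1⟩ <;> rcases h2 with h2 | ⟨e2, l2⟩
  · exact Or.inl (lt_trans h1 h2)
  · exact Or.inl (e2 ▸ h1)
  · exact Or.inl (e1 ▸ h2)
  · exact Or.inr ⟨e1.trans e2, lt_trans l1 l2⟩

theorem pvKeyLt_of_lt_of_le {a b c : String × Int} (h1 : pvKeyLt a b)
    (h2 : pvKeyLt b c ∨ b = c) : pvKeyLt a c := by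
  rcases h2 with h2 | rfl
  · exact pvKeyLt_trans h1 h2
  · exact h1

theorem pvKeyLt_resolve {a b : String × Int} (h : ¬ pvKeyLt a b) : pvKeyLt b a ∨ b = a := by
  unfold pvKeyLt at *
  rcases lt_trichotomy a.1 b.1 with hs | hs | hs
  · exact absurd (Or.inl hs) h
  · rcases lt_trichotomy a.2 b.2 with hi | hi | hi
    · exact absurd (Or.inr ⟨hs, hi⟩) h
    · right; exact Prod.ext hs.symm hi.symm
    · left; right; exact ⟨hs.symm, hi⟩
  · left; left; exact hs

-- the strict comparison function sorted2 inserts by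
def pvBef : ((String × Int) × Int) → ((String × Int) × Int) → Bool :=
  fun a b => decide (a.1.1 < b.1.1) || (!decide (b.1.1 < a.1.1) && decide (a.1.2 < b.1.2))

theorem pvBef_iff (a b : (String × Int) × Int) : pvBef a b = true ↔ pvKeyLt a.1 b.1 := by
  unfold pvBef pvKeyLt
  simp only [Bool.or_eq_true, Bool.and_eq_true, Bool.not_eq_true', decide_eq_true_eq,
    decide_eq_false_iff_not]
  constructor
  · rintro (h | ⟨h1, h2⟩)
    · exact Or.inl h
    · rcases lt_trichotomy a.1.1 b.1.1 with hs | hs | hs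
      · exact Or.inl hs
      · exact Or.inr ⟨hs, h2⟩
      · exact absurd hs h1
  · rintro (h | ⟨h1, h2⟩)
    · exact Or.inl h
    · right
      refine ⟨?_, h2⟩
      rw [h1]
      exact lt_irrefl _

theorem pvInsertBy_nil (x : (String × Int) × Int) :
    PySem.List.insertBy pvBef x [] = [x] := rfl

theorem pvInsertBy_cons (x a : (String × Int) × Int) (t : List ((String × Int) × Int)) :
    PySem.List.insertBy pvBef x (a :: t)
      = if pvBef x a = true then x :: a :: t else a :: PySem.List.insertBy pvBef x t := rfl

theorem pvInsertBy_pairwise (x : (String × Int) × Int) (acc : List ((String × Int) × Int))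
    (h : acc.Pairwise pvLT3) (hx : ∀ a ∈ acc, a.2 < x.2) :
    (PySem.List.insertBy pvBef x acc).Pairwise pvLT3 := by
  induction acc with
  | nil => rw [pvInsertBy_nil]; simp
  | cons a t ih =>
    rw [List.pairwise_cons] at h
    rw [pvInsertBy_cons]
    by_cases hb : pvBef x a = true
    · have hxa : pvKeyLt x.1 a.1 := (pvBef_iff x a).1 hb
      rw [if_pos hb, List.pairwise_cons]
      constructor
      · intro y hy
        rcases List.mem_cons.1 hy with rfl | hy
        · exact Or.inl hxa
        · have hay := h.1 y hy
          rcases hay with hay | ⟨e, _⟩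
          · exact Or.inl (pvKeyLt_trans hxa hay)
          · exact Or.inl (e ▸ hxa)
      · exact List.pairwise_cons.2 h
    · have hax : pvKeyLt a.1 x.1 ∨ a.1 = x.1 := by
        have := pvKeyLt_resolve (fun hk => hb ((pvBef_iff x a).2 hk))
        tauto
      rw [if_neg hb, List.pairwise_cons]
      refine ⟨?_, ih h.2 (fun y hy => hx y (List.mem_cons_of_mem _ hy))⟩
      intro y hy
      rcases (PySem.List.mem_insertBy _ _ _ _).1 hy with rfl | hy
      · rcases hax with hax | hax
        · exact Or.inl hax
        · exact Or.inr ⟨hax, hx a (List.mem_cons_self)⟩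
      · exact h.1 y hy

theorem pvSorted2_eq_foldl (xs : List ((String × Int) × Int)) :
    PySem.List.sorted2 xs (fun p => p.1.1) (fun p => p.1.2) false
      = xs.foldl (fun acc x => PySem.List.insertBy pvBef x acc) [] := rfl

theorem pvSorted2_pairwise (xs : List ((String × Int) × Int))
    (h : xs.Pairwise (fun a b => a.2 < b.2)) :
    (PySem.List.sorted2 xs (fun p => p.1.1) (fun p => p.1.2) false).Pairwise pvLT3 := by
  rw [pvSorted2_eq_foldl]
  induction xs using List.reverseRecOn with
  | nil => simp
  | append_singleton xs x ih =>
    rw [List.pairwise_append] at h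
    rw [List.foldl_append, List.foldl_cons, List.foldl_nil]
    apply pvInsertBy_pairwise _ _ (ih h.1)
    intro a ha
    have hmem : a ∈ xs := by
      have hp : (xs.foldl (fun acc x => PySem.List.insertBy pvBef x acc) []).Perm xs := by
        rw [← pvSorted2_eq_foldl]
        exact PySem.List.sorted2_perm xs _ _ false
      exact hp.mem_iff.1 ha
    exact h.2.2 a hmem x (by simp)

-- inside a Pairwise-pvLT3 list, after dropping the leading run of p's key, p's key is gone
theorem pvDrop_ne (p : (String × Int) × Int) :
    ∀ (t : List ((String × Int) × Int)), t.Pairwise pvLT3 → (∀ y ∈ t, pvLT3 p y) →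
    ∀ y ∈ t.dropWhile (fun q => q.1 == p.1), y.1 ≠ p.1 := by
  intro t
  induction t with
  | nil => intro _ _ y hy; simp at hy
  | cons a t ih =>
    intro hp hpt
    by_cases ha : (a.1 == p.1) = true
    · rw [List.dropWhile_cons, if_pos ha]
      exact ih (List.pairwise_cons.1 hp).2 (fun y hy => hpt y (List.mem_cons_of_mem _ hy))
    · rw [List.dropWhile_cons, if_neg ha]
      have hane : a.1 ≠ p.1 := by simpa using ha
      have hpa : pvKeyLt p.1 a.1 := by
        rcases hpt a List.mem_cons_self with hk | ⟨e, _⟩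
        · exact hk
        · exact absurd e.symm hane
      intro y hy
      rcases List.mem_cons.1 hy with rfl | hy
      · exact hane
      · have hay := (List.pairwise_cons.1 hp).1 y hy
        have : pvKeyLt p.1 y.1 := pvKeyLt_of_lt_of_le hpa (by
          rcases hay with h | ⟨e, _⟩
          · exact Or.inl h
          · exact Or.inr e)
        intro e
        exact pvKeyLt_irrefl p.1 (e ▸ this)

-- the run sweep on a sorted list: one run per key, each run = that key's occurrences
theorem pvRunG_char :
    ∀ (s : List ((String × Int) × Int)), s.Pairwise pvLT3 →
    (pvRunG s = (pvKeysG s).map (fun k => (s.filter (fun q => q.1 == k)).map (fun q => q.2))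
      ∧ (pvKeysG s).Nodup
      ∧ (∀ k, k ∈ pvKeysG s ↔ k ∈ s.map (fun q => q.1))) := by
  intro s
  induction s using pvRunG.induct with
  | case1 =>
    intro _
    refine ⟨?_, ?_, ?_⟩
    · rw [pvRunG, pvKeysG]; rfl
    · rw [pvKeysG]; exact List.nodup_nil
    · intro k; rw [pvKeysG]; simp
  | case2 p t ih =>
    intro hp
    have hpt := (List.pairwise_cons.1 hp).1
    have ht := (List.pairwise_cons.1 hp).2
    have htd : (t.dropWhile (fun q => q.1 == p.1)).Pairwise pvLT3 :=
      ht.sublist (List.dropWhile_sublist _)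
    have hdropne : ∀ y ∈ t.dropWhile (fun q => q.1 == p.1), y.1 ≠ p.1 := pvDrop_ne p t ht hpt
    obtain ⟨ih1, ih2, ih3⟩ := ih htd
    have htake : ∀ y ∈ t.takeWhile (fun q => q.1 == p.1), y.1 = p.1 := by
      intro y hy
      simpa using List.mem_takeWhile_imp hy
    have hsplit : t.takeWhile (fun q => q.1 == p.1) ++ t.dropWhile (fun q => q.1 == p.1) = t :=
      List.takeWhile_append_dropWhile
    have hfilp : (p :: t).filter (fun q => q.1 == p.1)
        = p :: t.takeWhile (fun q => q.1 == p.1) := by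
      rw [List.filter_cons_of_pos (by simp), ← hsplit, List.filter_append]
      rw [List.filter_eq_self.2 (fun y hy => by simpa using htake y hy)]
      rw [List.filter_eq_nil_iff.2 (fun y hy => by simpa using hdropne y hy)]
      simp
    have hkeysmem : ∀ k ∈ pvKeysG (t.dropWhile (fun q => q.1 == p.1)), k ≠ p.1 := by
      intro k hk
      rcases List.mem_map.1 ((ih3 k).1 hk) with ⟨y, hy, he⟩
      exact he ▸ hdropne y hy
    refine ⟨?_, ?_, ?_⟩
    · rw [show pvRunG (p :: t)
          = (p.2 :: (t.takeWhile (fun q => q.1 == p.1)).map (fun q => q.2)) ::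
            pvRunG (t.dropWhile (fun q => q.1 == p.1)) from by rw [pvRunG]]
      rw [show pvKeysG (p :: t) = p.1 :: pvKeysG (t.dropWhile (fun q => q.1 == p.1)) from by
        rw [pvKeysG]]
      rw [List.map_cons, hfilp, List.map_cons]
      congr 1
      rw [ih1]
      apply List.map_congr_left
      intro k hk
      have hkne := hkeysmem k hk
      have hfil : (p :: t).filter (fun q => q.1 == k)
          = (t.dropWhile (fun q => q.1 == p.1)).filter (fun q => q.1 == k) := by
        rw [List.filter_cons_of_neg (by simpa using fun e => hkne e.symm), ← hsplit,
          List.filter_append]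
        rw [List.filter_eq_nil_iff.2 (fun y hy => by
          have hyp := htake y hy
          simp only [beq_iff_eq, hyp]
          exact fun e => hkne e.symm)]
        rw [hsplit]
        exact List.nil_append _
      rw [hfil]
    · rw [show pvKeysG (p :: t) = p.1 :: pvKeysG (t.dropWhile (fun q => q.1 == p.1)) from by
        rw [pvKeysG]]
      exact List.nodup_cons.2 ⟨fun hc => (hkeysmem p.1 hc) rfl, ih2⟩
    · intro k
      rw [show pvKeysG (p :: t) = p.1 :: pvKeysG (t.dropWhile (fun q => q.1 == p.1)) from by
        rw [pvKeysG]]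
      simp only [List.mem_cons, ih3, List.map_cons]
      constructor
      · rintro (rfl | hk)
        · exact Or.inl rfl
        · rcases List.mem_map.1 hk with ⟨y, hy, he⟩
          have hyt : y ∈ t := (List.dropWhile_sublist _).mem hy
          exact Or.inr (List.mem_map.2 ⟨y, hyt, he⟩)
      · rintro (rfl | hk)
        · exact Or.inl rfl
        · by_cases hky : k = p.1
          · exact Or.inl hky
          · right
            rcases List.mem_map.1 hk with ⟨y, hy, he⟩
            rw [← hsplit] at hy
            rcases List.mem_append.1 hy with hy | hy
            · exact absurd (he.symm.trans (htake y hy)) hky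
            · exact List.mem_map.2 ⟨y, hy, he⟩

-- a key's occurrence list is the same whether read from the sorted list or the original
theorem pvOcc_eq (s pairs : List ((String × Int) × Int)) (hperm : s.Perm pairs)
    (hs : s.Pairwise pvLT3) (hp : pairs.Pairwise (fun a b => a.2 < b.2)) (k : String × Int) :
    s.filter (fun q => q.1 == k) = pairs.filter (fun q => q.1 == k) := by
  apply List.eq_of_perm_of_sorted (le := fun a b => a.2 < b.2)
  · intro a b _ _ h1 h2
    exact absurd (lt_trans h1 h2) (lt_irrefl _)
  · apply (hs.sublist List.filter_sublist).imp_of_mem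
    intro a b ha hb hab
    have hak : a.1 = k := by simpa using (List.mem_filter.1 ha).2
    have hbk : b.1 = k := by simpa using (List.mem_filter.1 hb).2
    rcases hab with hab | ⟨_, hi⟩
    · rw [hak, hbk] at hab
      exact absurd hab (pvKeyLt_irrefl k)
    · exact hi
  · exact hp.sublist List.filter_sublist
  · exact hperm.filter _

-- heads of the groups A builds are its keys' first-occurrence indices, strictly increasing
theorem pvAdd_ne_nil (acc : List ((String × Int) × List Int)) (k : String × Int) (i : Int)
    (h : ∀ q ∈ acc, q.2 ≠ []) : ∀ q ∈ pvAdd acc k i, q.2 ≠ [] := by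
  induction acc with
  | nil => intro q hq; simp [pvAdd] at hq; simp [hq]
  | cons a t ih =>
    intro q hq
    by_cases hb : (a.1 == k) = true
    · rw [show pvAdd (a :: t) k i = (a.1, a.2 ++ [i]) :: t from by simp [pvAdd, hb]] at hq
      rcases List.mem_cons.1 hq with rfl | hq
      · simp
      · exact h q (List.mem_cons_of_mem _ hq)
    · rw [show pvAdd (a :: t) k i = a :: pvAdd t k i from by simp [pvAdd, hb]] at hq
      rcases List.mem_cons.1 hq with rfl | hq
      · exact h q List.mem_cons_self
      · exact ih (fun q' hq' => h q' (List.mem_cons_of_mem _ hq')) q hq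

theorem pvAdd_elem (acc : List ((String × Int) × List Int)) (k : String × Int) (i : Int) :
    ∀ q ∈ pvAdd acc k i, ∀ j ∈ q.2, (∃ q' ∈ acc, j ∈ q'.2) ∨ j = i := by
  induction acc with
  | nil =>
    intro q hq j hj
    simp [pvAdd] at hq
    subst hq
    simp at hj
    exact Or.inr hj
  | cons a t ih =>
    intro q hq j hj
    by_cases hb : (a.1 == k) = true
    · rw [show pvAdd (a :: t) k i = (a.1, a.2 ++ [i]) :: t from by simp [pvAdd, hb]] at hq
      rcases List.mem_cons.1 hq with rfl | hq
      · simp only [List.mem_append, List.mem_singleton] at hj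
        rcases hj with hj | hj
        · exact Or.inl ⟨a, List.mem_cons_self, hj⟩
        · exact Or.inr hj
      · exact Or.inl ⟨q, List.mem_cons_of_mem _ hq, hj⟩
    · rw [show pvAdd (a :: t) k i = a :: pvAdd t k i from by simp [pvAdd, hb]] at hq
      rcases List.mem_cons.1 hq with rfl | hq
      · exact Or.inl ⟨q, List.mem_cons_self, hj⟩
      · rcases ih q hq j hj with ⟨q', hq', hjq⟩ | hji
        · exact Or.inl ⟨q', List.mem_cons_of_mem _ hq', hjq⟩
        · exact Or.inr hji

theorem pvAdd_heads (acc : List ((String × Int) × List Int)) (k : String × Int) (i : Int)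
    (h : ∀ q ∈ acc, q.2 ≠ []) :
    (pvAdd acc k i).map (fun q => q.2.headD 0) =
      if k ∈ acc.map Prod.fst then acc.map (fun q => q.2.headD 0)
      else acc.map (fun q => q.2.headD 0) ++ [i] := by
  induction acc with
  | nil => simp [pvAdd]
  | cons a t ih =>
    by_cases hb : a.1 = k
    · have hbeq : (a.1 == k) = true := by simp [hb]
      have hne := h a List.mem_cons_self
      rw [show pvAdd (a :: t) k i = (a.1, a.2 ++ [i]) :: t from by simp [pvAdd, hbeq]]
      rw [if_pos (by simp [hb])]
      simp only [List.map_cons]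
      congr 1
      cases ha : a.2 with
      | nil => exact absurd ha hne
      | cons x xs => simp
    · have hbeq : (a.1 == k) = false := by simp [hb]
      rw [show pvAdd (a :: t) k i = a :: pvAdd t k i from by simp [pvAdd, hbeq]]
      have ih' := ih (fun q hq => h q (List.mem_cons_of_mem _ hq))
      by_cases hm : k ∈ t.map Prod.fst
      · rw [if_pos (by simp [hm])]
        simp only [List.map_cons, ih', if_pos hm]
      · rw [if_neg (by simp [hm, Ne.symm hb])]
        simp only [List.map_cons, ih', if_neg hm]
        simp

theorem pvHeads_fold :
    ∀ (ps : List (Int × (String × Int))) (acc : List ((String × Int) × List Int)),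
    ps.Pairwise (fun a b => a.1 < b.1) →
    (∀ p ∈ ps, ∀ q ∈ acc, ∀ j ∈ q.2, j < p.1) →
    (∀ q ∈ acc, q.2 ≠ []) →
    ((acc.map (fun q => q.2.headD 0)).Pairwise (· < ·)) →
    (((ps.foldl (fun a p => pvAdd a p.2 p.1) acc)).map (fun q => q.2.headD 0)).Pairwise (· < ·) := by
  intro ps
  induction ps with
  | nil => intro acc _ _ _ h4; simpa using h4
  | cons p t ih =>
    intro acc h1 h2 h3 h4
    rw [List.pairwise_cons] at h1
    simp only [List.foldl_cons]
    apply ih _ h1.2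
    · intro p' hp' q hq j hj
      rcases pvAdd_elem acc p.2 p.1 q hq j hj with ⟨q', hq', hjq⟩ | rfl
      · exact h2 p' (List.mem_cons_of_mem _ hp') q' hq' j hjq
      · exact h1.1 p' hp'
    · exact pvAdd_ne_nil acc p.2 p.1 h3
    · rw [pvAdd_heads acc p.2 p.1 h3]
      split_ifs with hm
      · exact h4
      · rw [List.pairwise_append]
        refine ⟨h4, List.pairwise_singleton _ _, ?_⟩
        intro x hx y hy
        rcases List.mem_map.1 hx with ⟨q, hq, he⟩
        have hqne := h3 q hq
        have hxm : x ∈ q.2 := by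
          cases hc : q.2 with
          | nil => exact absurd hc hqne
          | cons z zs => rw [← he]; simp [hc]
        rw [List.mem_singleton.1 hy]
        exact h2 p List.mem_cons_self q hq x hxm

-- enumerate yields strictly increasing indices
theorem pvEnum_lt {α : Type} (l : List α) :
    ∀ (s : Int), (PySem.List.enumerate l s).Pairwise (fun a b => a.1 < b.1) := by
  induction l with
  | nil => intro s; simp [PySem.List.enumerate_nil]
  | cons x t ih =>
    intro s
    rw [PySem.List.enumerate_cons, List.pairwise_cons]
    refine ⟨?_, ih (s + 1)⟩
    intro y hy
    have : ∀ (t' : List α) (s' : Int), ∀ y ∈ PySem.List.enumerate t' s', s' ≤ y.1 := by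
      intro t'
      induction t' with
      | nil => intro s' y hy; simp [PySem.List.enumerate_nil] at hy
      | cons z zs ihz =>
        intro s' y hy
        rw [PySem.List.enumerate_cons] at hy
        rcases List.mem_cons.1 hy with rfl | hy
        · simp
        · have := ihz (s' + 1) y hy
          omega
    have := this t (s + 1) y hy
    omega

theorem pvGet0 (g : List Int) (h : g ≠ []) : PySem.List.pyGetD g 0 0 = g.headD 0 := by
  cases g with
  | nil => exact absurd rfl h
  | cons x t => simp [PySem.List.pyGetD, PySem.List.pyGet?, PySem.List.pyIdx?]

-- ===== message-formatting lemmas (shared shape of both ports' reporting loops) =====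

theorem pvJoin_single (sep a : String) : PySem.Str.join sep [a] = a := by
  simp [PySem.Str.join, PySem.Chars.join, List.intercalate]

theorem pvJoin_cons2 (sep a b : String) (l : List String) :
    PySem.Str.join sep (a :: b :: l) = a ++ sep ++ PySem.Str.join sep (b :: l) := by
  have h : ∀ (s x y : List Char) (m : List (List Char)),
      List.intercalate s (x :: y :: m) = x ++ s ++ List.intercalate s (y :: m) := by
    intro s x y m
    simp only [List.intercalate, List.intersperse_cons₂, List.flatten_cons, List.append_assoc]
  simp only [PySem.Str.join, PySem.Chars.join, List.map_cons, h]
  simp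
  rw [String.append_assoc]

theorem pvL2 (rest : List String) :
    ∀ (m : String) (s total : Int), 1 ≤ s → total = s + rest.length → rest ≠ [] →
    (PySem.List.enumerate rest s).foldl
      (fun m p => (if p.1 ≠ 0 then (if p.1 < total - 1 then m ++ ", " else m ++ " e ") else m) ++ p.2) m
    = m ++ pvGlue rest := by
  induction rest with
  | nil => intro m s total _ _ h; exact absurd rfl h
  | cons x t ih =>
    intro m s total hs htot _
    rw [PySem.List.enumerate_cons, List.foldl_cons]
    have hs0 : s ≠ 0 := by omega
    cases t with
    | nil =>
      have : ¬ s < total - 1 := by simp at htot; omega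
      simp only [hs0, ne_eq, not_false_iff, if_true, this, if_false,
        PySem.List.enumerate_nil, List.foldl_nil, pvGlue]
      rw [String.append_assoc]
    | cons y t' =>
      have hlt : s < total - 1 := by
        simp only [List.length_cons] at htot; push_cast at htot; omega
      simp only [hs0, ne_eq, not_false_iff, hlt, if_pos]
      rw [ih ((m ++ ", ") ++ x) (s + 1) total (by omega)
        (by simp only [List.length_cons] at htot ⊢; push_cast at htot ⊢; omega) (by simp)]
      show (m ++ ", ") ++ x ++ pvGlue (y :: t') = m ++ pvGlue (x :: y :: t')
      simp only [pvGlue, String.append_assoc]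

theorem pvGlue_join (rest : List String) :
    ∀ (a : String), rest ≠ [] →
    a ++ pvGlue rest
      = PySem.Str.join ", " ((a :: rest).dropLast) ++ " e "
          ++ (a :: rest).getLast (by simp) := by
  induction rest with
  | nil => intro a h; exact absurd rfl h
  | cons x t ih =>
    intro a _
    cases t with
    | nil =>
      have h1 : (a :: [x]).dropLast = [a] := rfl
      have h2 : ([a, x].getLast (by simp)) = x := rfl
      rw [h1, h2, pvJoin_single]
      simp [pvGlue, String.append_assoc]
    | cons y t' =>
      have hx := ih x (by simp)
      have hdl : ((x :: y :: t').dropLast) ≠ [] := by simp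
      have hcons : (a :: x :: y :: t').dropLast = a :: (x :: y :: t').dropLast := by
        simp [List.dropLast_cons₂]
      rw [hcons]
      obtain ⟨z, zs, hz⟩ : ∃ z zs, (x :: y :: t').dropLast = z :: zs := by
        cases h : (x :: y :: t').dropLast with
        | nil => exact absurd h hdl
        | cons z zs => exact ⟨z, zs, rfl⟩
      rw [hz, pvJoin_cons2, ← hz]
      have hlast : (a :: x :: y :: t').getLast (by simp) = (x :: y :: t').getLast (by simp) :=
        List.getLast_cons _
      rw [hlast]
      show a ++ pvGlue (x :: y :: t') = a ++ ", " ++ PySem.Str.join ", " ((x :: y :: t').dropLast) ++ " e " ++ (x :: y :: t').getLast (by simp)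
      simp only [pvGlue, String.append_assoc] at hx ⊢
      rw [hx]

-- fold over range(len(xs)) reading xs[i] = fold over enumerate(xs)
theorem pvFoldEnum {α β : Type} (xs : List α) (d : α) (F : β → Int × α → β) (init : β) :
    (PySem.List.pyRange 0 (xs.length : Int) 1).foldl
      (fun acc i => F acc (i, PySem.List.pyGetD xs i d)) init
      = (PySem.List.enumerate xs).foldl F init := by
  rw [PySem.List.enumerate_eq_map_pyRange xs d, List.foldl_map, PySem.List.len_eq]

theorem pvEnumMap {α β : Type} (f : α → β) (l : List α) :
    ∀ s : Int, PySem.List.enumerate (l.map f) s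
      = (PySem.List.enumerate l s).map (fun p => (p.1, f p.2)) := by
  induction l with
  | nil => intro s; simp [PySem.List.enumerate_nil]
  | cons x t ih => intro s; simp [PySem.List.enumerate_cons, ih]

theorem pvStage1 (arquivo : List (Int × (String × Int))) :
    (PySem.List.pyRange 0 (arquivo.length : Int) 1).foldl
      (fun (st : List (String × Int) × List Int) i =>
        (st.1 ++ [if (PySem.List.pyGetD arquivo i (0, ("", 0))).2.2 = 0 then
            ((PySem.List.pyGetD arquivo i (0, ("", 0))).2.1, (PySem.List.pyGetD arquivo i (0, ("", 0))).2.2)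
          else ((PySem.List.pyGetD arquivo i (0, ("", 0))).2.1, (PySem.List.pyGetD arquivo i (0, ("", 0))).2.2 - 1)],
         st.2 ++ [i])) ([], [])
    = (arquivo.map pvNorm, PySem.List.pyRange 0 (arquivo.length : Int) 1) := by
  rw [pvFoldEnum arquivo (0, ("", 0))
    (fun (st : List (String × Int) × List Int) p =>
      (st.1 ++ [if p.2.2.2 = 0 then (p.2.2.1, p.2.2.2) else (p.2.2.1, p.2.2.2 - 1)],
       st.2 ++ [p.1])) ([], [])]
  rw [PySem.List.foldl_prod_mk
    (fun (s : List (String × Int)) (p : Int × (Int × (String × Int))) =>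
      s ++ [if p.2.2.2 = 0 then (p.2.2.1, p.2.2.2) else (p.2.2.1, p.2.2.2 - 1)])
    (fun (s : List Int) (p : Int × (Int × (String × Int))) => s ++ [p.1])]
  rw [PySem.List.foldl_append_singleton_eq_map, PySem.List.foldl_append_singleton_eq_map]
  simp only [List.nil_append, Prod.mk.injEq]
  constructor
  · show (PySem.List.enumerate arquivo).map (fun p => pvNorm p.2) = arquivo.map pvNorm
    rw [show (fun (p : Int × (Int × (String × Int))) => pvNorm p.2)
        = (pvNorm ∘ fun (p : Int × (Int × (String × Int))) => p.2) from rfl]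
    rw [← List.map_map, PySem.List.map_snd_enumerate]
  · show (PySem.List.enumerate arquivo).map (fun p => p.1) = _
    rw [PySem.List.map_fst_enumerate]
    norm_num

theorem pvStage2 (arquivo : List (Int × (String × Int))) :
    (PySem.List.pyRange 0 ((arquivo.map pvNorm).length : Int) 1).foldl
      (fun (st : List (String × Int) × List (List Int)) i =>
        if 1 < PySem.List.count (arquivo.map pvNorm) (PySem.List.pyGetD (arquivo.map pvNorm) i ("", 0)) then
          if PySem.List.count st.1 (PySem.List.pyGetD (arquivo.map pvNorm) i ("", 0)) = 0 then
            (st.1 ++ [PySem.List.pyGetD (arquivo.map pvNorm) i ("", 0)],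
             st.2 ++ [[PySem.List.pyGetD (PySem.List.pyRange 0 (arquivo.length : Int) 1) i 0]])
          else
            (st.1, st.2.modify ((PySem.List.index? st.1 (PySem.List.pyGetD (arquivo.map pvNorm) i ("", 0))).getD 0)
              (· ++ [PySem.List.pyGetD (PySem.List.pyRange 0 (arquivo.length : Int) 1) i 0]))
        else st) ([], [])
    = (((((PySem.List.enumerate arquivo).map (fun p => (p.1, pvNorm p.2))).foldl
          (fun a p => pvAdd a p.2 p.1) []).filter
            (fun q => decide (1 < PySem.List.count (arquivo.map pvNorm) q.1))).map Prod.fst,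
       ((((PySem.List.enumerate arquivo).map (fun p => (p.1, pvNorm p.2))).foldl
          (fun a p => pvAdd a p.2 p.1) []).filter
            (fun q => decide (1 < PySem.List.count (arquivo.map pvNorm) q.1))).map Prod.snd) := by
  have hrepl : (PySem.List.pyRange 0 ((arquivo.map pvNorm).length : Int) 1).foldl
      (fun (st : List (String × Int) × List (List Int)) i =>
        if 1 < PySem.List.count (arquivo.map pvNorm) (PySem.List.pyGetD (arquivo.map pvNorm) i ("", 0)) then
          if PySem.List.count st.1 (PySem.List.pyGetD (arquivo.map pvNorm) i ("", 0)) = 0 then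
            (st.1 ++ [PySem.List.pyGetD (arquivo.map pvNorm) i ("", 0)],
             st.2 ++ [[PySem.List.pyGetD (PySem.List.pyRange 0 (arquivo.length : Int) 1) i 0]])
          else
            (st.1, st.2.modify ((PySem.List.index? st.1 (PySem.List.pyGetD (arquivo.map pvNorm) i ("", 0))).getD 0)
              (· ++ [PySem.List.pyGetD (PySem.List.pyRange 0 (arquivo.length : Int) 1) i 0]))
        else st) ([], [])
      = (PySem.List.pyRange 0 ((arquivo.map pvNorm).length : Int) 1).foldl
      (fun (st : List (String × Int) × List (List Int)) i =>
        if 1 < PySem.List.count (arquivo.map pvNorm) (PySem.List.pyGetD (arquivo.map pvNorm) i ("", 0)) then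
          if PySem.List.count st.1 (PySem.List.pyGetD (arquivo.map pvNorm) i ("", 0)) = 0 then
            (st.1 ++ [PySem.List.pyGetD (arquivo.map pvNorm) i ("", 0)], st.2 ++ [[i]])
          else
            (st.1, st.2.modify ((PySem.List.index? st.1 (PySem.List.pyGetD (arquivo.map pvNorm) i ("", 0))).getD 0)
              (· ++ [i]))
        else st) ([], []) := by
    apply PySem.List.foldl_congr_mem
    intro acc i hi
    have hi' := PySem.List.mem_pyRange_one.1 hi
    have h0 : (0:Int) ≤ i := hi'.1
    have h1 : i < (arquivo.length : Int) := by
      have := hi'.2; simpa using this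
    have hgl : PySem.List.pyGetD (PySem.List.pyRange 0 (arquivo.length : Int) 1) i 0 = i := by
      have hlen : i.toNat < (PySem.List.pyRange 0 (arquivo.length : Int) 1).length := by
        rw [PySem.List.length_pyRange_one]; omega
      rw [PySem.List.pyGetD_eq_getElem _ 0 h0 (by rw [PySem.List.length_pyRange_one]; omega)]
      rw [PySem.List.getElem_pyRange_one 0 (arquivo.length : Int) i.toNat hlen]
      omega
    rw [hgl]
  rw [hrepl]
  rw [pvFoldEnum (arquivo.map pvNorm) ("", 0)
    (fun (st : List (String × Int) × List (List Int)) p =>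
      if 1 < PySem.List.count (arquivo.map pvNorm) p.2 then
        if PySem.List.count st.1 p.2 = 0 then (st.1 ++ [p.2], st.2 ++ [[p.1]])
        else (st.1, st.2.modify ((PySem.List.index? st.1 p.2).getD 0) (· ++ [p.1]))
      else st) ([], [])]
  rw [pvEnumMap pvNorm arquivo 0]
  have := pv_main (fun k => 1 < PySem.List.count (arquivo.map pvNorm) k)
    ((PySem.List.enumerate arquivo).map (fun p => (p.1, pvNorm p.2))) [] (by simp)
  simpa using this

theorem pvLen_fold (ps : List (Int × (String × Int))) (q : (String × Int) × List Int)
    (hq : q ∈ ps.foldl (fun a p => pvAdd a p.2 p.1) []) :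
    q.2.length = List.count q.1 (ps.map Prod.snd) := by
  have h1 : pvLook (ps.foldl (fun a p => pvAdd a p.2 p.1) []) q.1 = q.2 :=
    pvLook_mem _ (nodup_pvFold ps [] (by simp)) q hq
  have h2 := pvLook_fold ps [] q.1
  rw [h1] at h2
  have : q.2.length = ((ps.filter (fun p => p.2 == q.1)).map Prod.fst).length := by
    rw [h2]; simp [pvLook]
  rw [this, List.length_map, ← List.countP_eq_length_filter, List.count, List.countP_map]
  rfl

theorem pvStage3 (arquivo : List (Int × (String × Int))) :
    (((PySem.List.enumerate arquivo).map (fun p => (p.1, pvNorm p.2))).foldl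
        (fun a p => pvAdd a p.2 p.1) []).filter
          (fun q => decide (1 < PySem.List.count (arquivo.map pvNorm) q.1))
    = (((PySem.List.enumerate arquivo).map (fun p => (p.1, pvNorm p.2))).foldl
        (fun a p => pvAdd a p.2 p.1) []).filter (fun q => decide (1 < q.2.length)) := by
  apply List.filter_congr
  intro q hq
  have hlen := pvLen_fold ((PySem.List.enumerate arquivo).map (fun p => (p.1, pvNorm p.2))) q hq
  have hsnd : ((PySem.List.enumerate arquivo).map (fun p => (p.1, pvNorm p.2))).map Prod.snd
      = arquivo.map pvNorm := by
    rw [List.map_map]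
    rw [show (Prod.snd ∘ fun (p : Int × (Int × (String × Int))) => (p.1, pvNorm p.2))
        = (pvNorm ∘ fun (p : Int × (Int × (String × Int))) => p.2) from rfl]
    rw [← List.map_map, PySem.List.map_snd_enumerate]
  rw [hsnd] at hlen
  have : PySem.List.count (arquivo.map pvNorm) q.1 = q.2.length := by
    rw [hlen]; rfl
  rw [this]

theorem pvMsgOne (arquivo : List (Int × (String × Int))) (grp : List Int) (m0 : String)
    (h : 1 < grp.length) :
    (PySem.List.pyRange 0 (grp.length : Int) 1).foldl
      (fun (m : String) j =>
        (if j ≠ 0 then (if j < (grp.length : Int) - 1 then m ++ ", " else m ++ " e ") else m) ++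
          PySem.Int.toStr ((PySem.List.pyGetD arquivo (PySem.List.pyGetD grp j 0) (0, ("", 0))).1 + 1)) m0
    = m0 ++ PySem.Str.join ", "
          (PySem.List.slice (grp.map (fun j => PySem.Int.toStr ((PySem.List.pyGetD arquivo j (0, ("", 0))).1 + 1))) none (some (-1)))
        ++ " e "
        ++ PySem.List.pyGetD (grp.map (fun j => PySem.Int.toStr ((PySem.List.pyGetD arquivo j (0, ("", 0))).1 + 1))) (-1) "" := by
  rw [pvFoldEnum grp 0
    (fun (m : String) p =>
      (if p.1 ≠ 0 then (if p.1 < (grp.length : Int) - 1 then m ++ ", " else m ++ " e ") else m) ++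
        PySem.Int.toStr ((PySem.List.pyGetD arquivo p.2 (0, ("", 0))).1 + 1)) m0]
  set F : Int → String := fun j => PySem.Int.toStr ((PySem.List.pyGetD arquivo j (0, ("", 0))).1 + 1) with hF
  have hmap : (PySem.List.enumerate grp).foldl
      (fun (m : String) p =>
        (if p.1 ≠ 0 then (if p.1 < (grp.length : Int) - 1 then m ++ ", " else m ++ " e ") else m) ++ F p.2) m0
      = (PySem.List.enumerate (grp.map F)).foldl
      (fun (m : String) p =>
        (if p.1 ≠ 0 then (if p.1 < (grp.length : Int) - 1 then m ++ ", " else m ++ " e ") else m) ++ p.2) m0 := by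
    rw [pvEnumMap F grp 0, List.foldl_map]
  rw [hmap]
  obtain ⟨a, rest, hcons⟩ : ∃ a rest, grp.map F = a :: rest := by
    cases hg : grp.map F with
    | nil => rw [List.map_eq_nil_iff] at hg; subst hg; simp at h
    | cons a rest => exact ⟨a, rest, rfl⟩
  have hrest : rest ≠ [] := by
    have := congrArg List.length hcons
    simp at this
    intro hr; rw [hr] at this; simp at this; omega
  rw [hcons, PySem.List.enumerate_cons, List.foldl_cons]
  have h0 : ((if (0:Int) ≠ 0 then (if (0:Int) < (grp.length : Int) - 1 then m0 ++ ", " else m0 ++ " e ") else m0) ++ a) = m0 ++ a := by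
    norm_num
  rw [h0, show ((0:Int) + 1) = 1 from by norm_num]
  have hlen : (grp.length : Int) = ((a :: rest).length : Int) := by
    rw [← hcons, List.length_map]
  rw [show (fun (m : String) (p : Int × String) =>
        (if p.1 ≠ 0 then (if p.1 < (grp.length : Int) - 1 then m ++ ", " else m ++ " e ") else m) ++ p.2)
      = (fun (m : String) (p : Int × String) =>
        (if p.1 ≠ 0 then (if p.1 < (1 + (rest.length : Int)) - 1 then m ++ ", " else m ++ " e ") else m) ++ p.2) from by
    rw [hlen]; norm_num]
  rw [pvL2 rest (m0 ++ a) 1 (1 + (rest.length : Int)) (by omega) (by ring) hrest]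
  have hgj := pvGlue_join rest a hrest
  rw [PySem.List.slice_to_neg_one, PySem.List.pyGetD_neg_one (h := by simp)]
  rw [String.append_assoc, hgj]
  simp only [String.append_assoc]

theorem pvMsgFold (arquivo : List (Int × (String × Int))) (lr : List (List Int))
    (hlr : ∀ g ∈ lr, 1 < g.length) :
    (PySem.List.pyRange 0 (lr.length : Int) 1).foldl
      (fun (er : List String) i =>
        er ++ [(PySem.List.pyRange 0 ((PySem.List.pyGetD lr i []).length : Int) 1).foldl
          (fun (m : String) j =>
            (if j ≠ 0 then (if j < ((PySem.List.pyGetD lr i []).length : Int) - 1 then m ++ ", " else m ++ " e ") else m) ++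
              PySem.Int.toStr ((PySem.List.pyGetD arquivo (PySem.List.pyGetD (PySem.List.pyGetD lr i []) j 0) (0, ("", 0))).1 + 1))
          ("Erro, o mesmo dado [" ++ (PySem.List.pyGetD arquivo (PySem.List.pyGetD (PySem.List.pyGetD lr i []) 0 0) (0, ("", 0))).2.1 ++
            "] foi mencionado mais de uma vez [" ++
            (if (PySem.List.pyGetD arquivo (PySem.List.pyGetD (PySem.List.pyGetD lr i []) 0 0) (0, ("", 0))).2.2 = 2
              then "com um @" else "com um ! ou nada") ++
            "], mantes em somente uma das seguintes linhas [isso não é um erro, é a indicação de uma redundância no arquivo]: ")]) []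
    = lr.foldl
      (fun (er : List String) idxs =>
        er ++ ["Erro, o mesmo dado [" ++ (PySem.List.pyGetD arquivo (PySem.List.pyGetD idxs 0 0) (0, ("", 0))).2.1 ++
          "] foi mencionado mais de uma vez [" ++
          (if (PySem.List.pyGetD arquivo (PySem.List.pyGetD idxs 0 0) (0, ("", 0))).2.2 = 2
            then "com um @" else "com um ! ou nada") ++
          "], mantes em somente uma das seguintes linhas [isso não é um erro, é a indicação de uma redundância no arquivo]: " ++
          PySem.Str.join ", " (PySem.List.slice (idxs.map (fun j => PySem.Int.toStr ((PySem.List.pyGetD arquivo j (0, ("", 0))).1 + 1))) none (some (-1))) ++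
          " e " ++ PySem.List.pyGetD (idxs.map (fun j => PySem.Int.toStr ((PySem.List.pyGetD arquivo j (0, ("", 0))).1 + 1))) (-1) ""]) [] := by
  rw [PySem.List.foldl_pyRange_zero_pyGetD' lr []
    (fun (er : List String) (grp : List Int) =>
      er ++ [(PySem.List.pyRange 0 ((grp.length : Int)) 1).foldl
        (fun (m : String) j =>
          (if j ≠ 0 then (if j < ((grp.length : Int)) - 1 then m ++ ", " else m ++ " e ") else m) ++
            PySem.Int.toStr ((PySem.List.pyGetD arquivo (PySem.List.pyGetD grp j 0) (0, ("", 0))).1 + 1))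
        ("Erro, o mesmo dado [" ++ (PySem.List.pyGetD arquivo (PySem.List.pyGetD grp 0 0) (0, ("", 0))).2.1 ++
          "] foi mencionado mais de uma vez [" ++
          (if (PySem.List.pyGetD arquivo (PySem.List.pyGetD grp 0 0) (0, ("", 0))).2.2 = 2
            then "com um @" else "com um ! ou nada") ++
          "], mantes em somente uma das seguintes linhas [isso não é um erro, é a indicação de uma redundância no arquivo]: ")]) []]
  apply PySem.List.foldl_congr_mem
  intro er grp hg
  rw [pvMsgOne arquivo grp _ (hlr grp hg)]

-- ===== VERDICT (by name: the statement is the Claim_ definition above) =====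
theorem dontrepete_doubled_spec : Claim_equal_dontrepete_doubled := by
  intro arquivo _
  show dontrepete_doubled arquivo = dontrepete_doubled_alt arquivo
  simp only [dontrepete_doubled, dontrepete_doubled_alt]
  rw [pvStage1 arquivo]
  rw [pvStage2 arquivo]
  rw [pvStage3 arquivo]
  rw [show (fun (p : Int × (Int × (String × Int))) =>
        ((p.2.2.1, if p.2.2.2 ≠ 0 then p.2.2.2 - 1 else p.2.2.2), p.1))
      = (fun (p : Int × (Int × (String × Int))) => (pvNorm p.2, p.1)) from
    funext (fun p => by rw [pvNorm_eq])]
  set pairsN := (PySem.List.enumerate arquivo).map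
    (fun (p : Int × (Int × (String × Int))) => (pvNorm p.2, p.1)) with hpairsN
  set psN := (PySem.List.enumerate arquivo).map
    (fun (p : Int × (Int × (String × Int))) => (p.1, pvNorm p.2)) with hpsN
  set foldA := psN.foldl (fun a p => pvAdd a p.2 p.1) [] with hfoldA
  set s := PySem.List.sorted2 pairsN (fun p => p.1.1) (fun p => p.1.2) false with hsdef
  -- sortedness and permutation facts about the sorted pair list
  have hpe : pairsN.Pairwise (fun a b => a.2 < b.2) := by
    rw [hpairsN]
    exact List.pairwise_map.2 (pvEnum_lt arquivo 0)
  have hsPair : s.Pairwise pvLT3 := by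
    rw [hsdef]; exact pvSorted2_pairwise pairsN hpe
  have hperm : s.Perm pairsN := by
    rw [hsdef]; exact PySem.List.sorted2_perm pairsN _ _ false
  obtain ⟨hrun1, hndB, hmemB⟩ := pvRunG_char s hsPair
  have hocc : ∀ k, s.filter (fun q => q.1 == k) = pairsN.filter (fun q => q.1 == k) :=
    pvOcc_eq s pairsN hperm hsPair hpe
  -- each key's occurrence list, read off the original pair list
  have hlookA : ∀ k, pvLook foldA k
      = (pairsN.filter (fun q => q.1 == k)).map (fun q => q.2) := by
    intro k
    rw [hfoldA, pvLook_fold psN [] k]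
    rw [show pvLook [] k = [] from rfl, List.nil_append]
    rw [hpsN, hpairsN, List.filter_map, List.filter_map, List.map_map, List.map_map]
    rfl
  have hndA : (foldA.map Prod.fst).Nodup := by
    rw [hfoldA]; exact nodup_pvFold psN [] (by simp)
  have hentry : foldA = (foldA.map Prod.fst).map
      (fun k => (k, (pairsN.filter (fun q => q.1 == k)).map (fun q => q.2))) := by
    rw [List.map_map]
    conv_lhs => rw [← List.map_id foldA]
    apply List.map_congr_left
    intro q hq
    have h1 : pvLook foldA q.1 = q.2 := pvLook_mem foldA hndA q hq
    have h2 := hlookA q.1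
    rw [h1] at h2
    show q = (q.1, (pairsN.filter (fun p => p.1 == q.1)).map (fun p => p.2))
    rw [← h2]
  have hrun2 : pvRunG s = (pvKeysG s).map
      (fun k => (pairsN.filter (fun q => q.1 == k)).map (fun q => q.2)) := by
    rw [hrun1]
    apply List.map_congr_left
    intro k _
    rw [hocc k]
  -- the duplicate groups of both sides: maps of the same group function over two key lists
  set L := foldA.filter (fun q => decide (1 < q.2.length)) with hLdef
  have hL : L = ((foldA.map Prod.fst).filter
        (fun k => decide (1 < ((pairsN.filter (fun q => q.1 == k)).map (fun q => q.2)).length))).map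
      (fun k => (k, (pairsN.filter (fun q => q.1 == k)).map (fun q => q.2))) := by
    rw [hLdef]
    conv_lhs => rw [hentry]
    rw [List.filter_map]
    rfl
  have hG : L.map Prod.snd = ((foldA.map Prod.fst).filter
        (fun k => decide (1 < ((pairsN.filter (fun q => q.1 == k)).map (fun q => q.2)).length))).map
      (fun k => (pairsN.filter (fun q => q.1 == k)).map (fun q => q.2)) := by
    rw [hL, List.map_map]
    rfl
  have hdups : (pvRunG s).filter (fun g => decide (1 < g.length))
      = ((pvKeysG s).filter
          (fun k => decide (1 < ((pairsN.filter (fun q => q.1 == k)).map (fun q => q.2)).length))).map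
        (fun k => (pairsN.filter (fun q => q.1 == k)).map (fun q => q.2)) := by
    rw [hrun2, List.filter_map]
    rfl
  -- the two key lists carry the same keys, without duplicates
  have hmemA : ∀ k, k ∈ foldA.map Prod.fst ↔ k ∈ pvKeysG s := by
    intro k
    have h0 : k ∈ foldA.map Prod.fst ↔ k ∈ psN.map Prod.snd := by
      rw [hfoldA, pvMem_fst_fold psN [] k]
      simp
    have h2 : k ∈ s.map (fun q => q.1) ↔ k ∈ pairsN.map (fun q => q.1) :=
      (hperm.map (fun q => q.1)).mem_iff
    have h3 : pairsN.map (fun (q : (String × Int) × Int) => q.1) = psN.map Prod.snd := by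
      rw [hpairsN, hpsN, List.map_map, List.map_map]
      rfl
    rw [h0, hmemB k, h2, h3]
  have hpermF : (((foldA.map Prod.fst).filter
        (fun k => decide (1 < ((pairsN.filter (fun q => q.1 == k)).map (fun q => q.2)).length)))).Perm
      ((pvKeysG s).filter
        (fun k => decide (1 < ((pairsN.filter (fun q => q.1 == k)).map (fun q => q.2)).length))) := by
    rw [List.perm_ext_iff_of_nodup (hndA.filter _) (hndB.filter _)]
    intro k
    simp only [List.mem_filter]
    rw [hmemA k]
  have hpermG : (L.map Prod.snd).Perm ((pvRunG s).filter (fun g => decide (1 < g.length))) := by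
    rw [hG, hdups]
    exact hpermF.map _
  -- A's groups are ordered by strictly increasing first line
  have hheads : (L.map (fun q => q.2.headD 0)).Pairwise (· < ·) := by
    have hfull : (foldA.map (fun q => q.2.headD 0)).Pairwise (· < ·) := by
      rw [hfoldA]
      apply pvHeads_fold psN []
      · rw [hpsN]
        exact List.pairwise_map.2 (pvEnum_lt arquivo 0)
      · intro p _ q hq; simp at hq
      · intro q hq; simp at hq
      · simp
    rw [hLdef]
    exact hfull.sublist (List.filter_sublist.map _)
  have hGp : (L.map Prod.snd).Pairwise
      (fun g h => PySem.List.pyGetD g 0 0 < PySem.List.pyGetD h 0 0) := by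
    have h1 : (L.map Prod.snd).Pairwise (fun g h => g.headD 0 < h.headD 0) :=
      List.pairwise_map.2 (List.pairwise_map.1 hheads)
    apply h1.imp_of_mem
    intro g h hgm hhm hlt
    have hgne : g ≠ [] := by
      rcases List.mem_map.1 hgm with ⟨q, hq, rfl⟩
      have := (List.mem_filter.1 (hLdef ▸ hq)).2
      have hql : 1 < q.2.length := of_decide_eq_true this
      exact List.ne_nil_of_length_pos (by omega)
    have hhne : h ≠ [] := by
      rcases List.mem_map.1 hhm with ⟨q, hq, rfl⟩
      have := (List.mem_filter.1 (hLdef ▸ hq)).2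
      have hql : 1 < q.2.length := of_decide_eq_true this
      exact List.ne_nil_of_length_pos (by omega)
    rw [pvGet0 g hgne, pvGet0 h hhne]
    exact hlt
  -- the sweep loop computes the structural run recursion
  rw [show pvRunAux s 0 [] = pvRunG s from by rw [pvRunAux_eq s 0 [], List.drop_zero, List.nil_append]]
  -- therefore B's re-sort of its runs is exactly A's group list
  have hsorted : PySem.List.sorted ((pvRunG s).filter (fun g => decide (1 < g.length)))
      (fun g => PySem.List.pyGetD g 0 0) false = L.map Prod.snd :=
    PySem.List.sorted_eq_of_perm_of_pairwise_lt _ _ _ hpermG hGp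
  rw [hsorted]
  -- both reporting loops now run over the same group list
  by_cases hemp : L = []
  · rw [hemp]; norm_num
  · have hlr : ∀ g ∈ List.map Prod.snd L, 1 < g.length := by
      intro g hg
      rcases List.mem_map.1 hg with ⟨r, hr, hge⟩
      have h2 := (List.mem_filter.1 (hLdef ▸ hr)).2
      rw [← hge]
      exact of_decide_eq_true h2
    rw [pvMsgFold arquivo (List.map Prod.snd L) hlr]
    have hpos : 0 < (List.map Prod.snd L).length := by
      rw [List.length_map]
      exact List.length_pos_iff.2 hemp
    have hie : (List.map Prod.snd L).isEmpty = false := by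
      simp [hemp]
    rw [if_pos hpos, hie]
    norm_num
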